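-- pv_equiv track=rewrite | github.com/chenhaitao405/IQIdet | gauge/iqi_rules.py | choose_primary_result_code
-- ===== SOURCE A (Python) =====
-- from typing import Any, Dict, Iterable, List, Optional, Sequence, Tuple
--
-- MARKER_ERROR_CODES = {2001, 2002, 2003, 2004, 2005, 2006, 2007}
--
-- WIRE_ERROR_CODES = {3001, 3002, 3003, 3004, 3005}
--
-- ROI_ERROR_CODES = {1101, 1102}
--
-- def choose_primary_result_code(codes: Sequence[int]) -> int:
--     codes = [int(code) for code in codes if int(code) != 0]
--     if not codes:
--         return 0
--     for code in codes:
--         if code in ROI_ERROR_CODES: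
--             return code
--     for code in codes:
--         if code in MARKER_ERROR_CODES:
--             return code
--     for code in codes:
--         if code in WIRE_ERROR_CODES:
--             return code
--     return codes[0]
-- ===== SOURCE B (Python) =====
-- MARKER_ERROR_CODES = {2001, 2002, 2003, 2004, 2005, 2006, 2007}
-- WIRE_ERROR_CODES = {3001, 3002, 3003, 3004, 3005}
-- ROI_ERROR_CODES = {1101, 1102}
--
-- def choose_primary_result_code(codes):
--     codes = [int(code) for code in codes if int(code) != 0]
--     if not codes:
--         return 0
--     first_roi = first_marker = first_wire = None
--     for code in codes:
--         if first_roi is None and code in ROI_ERROR_CODES: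
--             first_roi = code
--         elif first_marker is None and code in MARKER_ERROR_CODES:
--             first_marker = code
--         elif first_wire is None and code in WIRE_ERROR_CODES:
--             first_wire = code
--     if first_roi is not None:
--         return first_roi
--     if first_marker is not None:
--         return first_marker
--     if first_wire is not None:
--         return first_wire
--     return codes[0]
-- ===== Notes on version B (the rewrite author's own statement) =====
-- stated objective: alternative
-- what changed: Replaces A's three sequential category scans over the filtered list with a single pass that records the first code seen in each category, then resolves by priority.
import Mathlib
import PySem

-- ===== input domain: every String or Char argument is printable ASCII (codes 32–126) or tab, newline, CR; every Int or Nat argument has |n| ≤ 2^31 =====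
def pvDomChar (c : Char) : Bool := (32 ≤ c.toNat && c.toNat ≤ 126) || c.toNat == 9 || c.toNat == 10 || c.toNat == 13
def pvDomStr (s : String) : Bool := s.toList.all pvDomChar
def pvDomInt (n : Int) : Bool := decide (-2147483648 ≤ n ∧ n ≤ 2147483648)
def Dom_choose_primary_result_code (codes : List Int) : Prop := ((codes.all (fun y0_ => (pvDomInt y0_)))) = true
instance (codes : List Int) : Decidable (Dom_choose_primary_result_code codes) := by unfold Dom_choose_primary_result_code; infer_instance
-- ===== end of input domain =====

-- B replaces A's three sequential priority scans with one pass recording the first code of each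
-- category; same return value, a different decomposition (objective: alternative).

-- ===== PORT A =====
def pvRoi (c : Int) : Bool := c == 1101 || c == 1102
def pvMarker (c : Int) : Bool :=
  c == 2001 || c == 2002 || c == 2003 || c == 2004 || c == 2005 || c == 2006 || c == 2007
def pvWire (c : Int) : Bool := c == 3001 || c == 3002 || c == 3003 || c == 3004 || c == 3005

-- one 'for code in codes: if code in S: return code' loop of A
def pvScanA (mem : Int → Bool) : List Int → Option Int
  | [] => none
  | c :: t => if mem c then some c else pvScanA mem t

def choose_primary_result_code (codes : List Int) : Int :=
  let cs := codes.filter (fun c => decide (c ≠ 0))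
  if cs.isEmpty then 0
  else
    match pvScanA pvRoi cs with
    | some c => c
    | none =>
      match pvScanA pvMarker cs with
      | some c => c
      | none =>
        match pvScanA pvWire cs with
        | some c => c
        | none => cs.headD 0   -- codes[0]; exact: cs is nonempty in this branch

-- ===== PORT B =====
-- single-pass update of (first_roi, first_marker, first_wire)
def pvStepB (st : Option Int × Option Int × Option Int) (c : Int) :
    Option Int × Option Int × Option Int :=
  match st with
  | (r, m, w) =>
    if r.isNone && pvRoi c then (some c, m, w)
    else if m.isNone && pvMarker c then (r, some c, w)
    else if w.isNone && pvWire c then (r, m, some c)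
    else (r, m, w)

def choose_primary_result_code_alt (codes : List Int) : Int :=
  let cs := codes.filter (fun c => decide (c ≠ 0))
  if cs.isEmpty then 0
  else
    match cs.foldl pvStepB (none, none, none) with
    | (r, m, w) =>
      match r with
      | some c => c
      | none =>
        match m with
        | some c => c
        | none =>
          match w with
          | some c => c
          | none => cs.headD 0   -- codes[0]; exact: cs is nonempty in this branch

-- ===== PRECONDITION & SPEC =====
def Spec_choose_primary_result_code (codes : List Int) (out : Int) : Prop := out = choose_primary_result_code_alt codes
instance (codes : List Int) (out : Int) : Decidable (Spec_choose_primary_result_code codes out) := by unfold Spec_choose_primary_result_code; infer_instance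

-- ===== CLAIM (what is proved, stated in full; the proofs are below) =====
def Claim_equal_choose_primary_result_code : Prop := ∀ (codes : List Int), Dom_choose_primary_result_code codes → Spec_choose_primary_result_code codes (choose_primary_result_code codes)

-- ===== LEMMAS AND PROOFS =====

-- scans of pointwise-equal predicates coincide
theorem scanA_congr {p q : Int → Bool} (cs : List Int)
    (h : ∀ c ∈ cs, p c = q c) : pvScanA p cs = pvScanA q cs := by
  induction cs with
  | nil => rfl
  | cons c t ih =>
    simp only [pvScanA, h c (by simp)]
    rw [ih (fun x hx => h x (by simp [hx]))]

-- the three literal code sets are pairwise disjoint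
theorem roi_not_marker (c : Int) (h : pvRoi c = true) : pvMarker c = false := by
  simp only [pvRoi, Bool.or_eq_true, beq_iff_eq] at h
  simp only [pvMarker, Bool.or_eq_false_iff, beq_eq_false_iff_ne, ne_eq]
  omega

theorem roi_not_wire (c : Int) (h : pvRoi c = true) : pvWire c = false := by
  simp only [pvRoi, Bool.or_eq_true, beq_iff_eq] at h
  simp only [pvWire, Bool.or_eq_false_iff, beq_eq_false_iff_ne, ne_eq]
  omega

theorem marker_not_wire (c : Int) (h : pvMarker c = true) : pvWire c = false := by
  simp only [pvMarker, Bool.or_eq_true, beq_iff_eq] at h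
  simp only [pvWire, Bool.or_eq_false_iff, beq_eq_false_iff_ne, ne_eq]
  omega

-- the single pass computes exactly the three first-match scans
theorem foldB_eq_scans (cs : List Int) (r m w : Option Int) :
    cs.foldl pvStepB (r, m, w) =
      ((if r.isNone then pvScanA pvRoi cs else none).or r,
       (if m.isNone then
          pvScanA (fun c => !(r.isNone && pvRoi c) && pvMarker c) cs
        else none).or m,
       (if w.isNone then
          pvScanA (fun c => !(r.isNone && pvRoi c) && (!(m.isNone && pvMarker c) && pvWire c)) cs
        else none).or w) := by
  induction cs generalizing r m w with
  | nil => cases r <;> cases m <;> cases w <;> simp [pvScanA]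
  | cons c t ih =>
    simp only [List.foldl_cons, pvStepB]
    by_cases hr : r.isNone && pvRoi c
    · rw [if_pos hr, ih]
      obtain ⟨hr1, hr2⟩ := Bool.and_eq_true_iff.mp hr
      have e1 : pvScanA pvMarker t = pvScanA (fun x => !pvRoi x && pvMarker x) t :=
        scanA_congr t (fun x _ => by
          by_cases h : pvRoi x <;> simp [h, roi_not_marker x])
      have e2 : pvScanA pvWire t = pvScanA (fun x => !pvRoi x && pvWire x) t :=
        scanA_congr t (fun x _ => by
          by_cases h : pvRoi x <;> simp [h, roi_not_wire x])
      have e3 : pvScanA (fun x => !pvMarker x && pvWire x) t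
          = pvScanA (fun x => !pvRoi x && (!pvMarker x && pvWire x)) t :=
        scanA_congr t (fun x _ => by
          by_cases h : pvRoi x <;> simp [h, roi_not_wire x])
      cases r <;> simp_all [pvScanA]
      cases m <;> cases w <;> simp_all
    · rw [if_neg hr]
      by_cases hm : m.isNone && pvMarker c
      · rw [if_pos hm]
        obtain ⟨hm1, hm2⟩ := Bool.and_eq_true_iff.mp hm
        have e3 : pvScanA pvWire t = pvScanA (fun x => !pvMarker x && pvWire x) t :=
          scanA_congr t (fun x _ => by
            by_cases h : pvMarker x <;> simp [h, marker_not_wire x])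
        have e4 : pvScanA (fun x => !pvRoi x && pvWire x) t
            = pvScanA (fun x => !pvRoi x && (!pvMarker x && pvWire x)) t :=
          scanA_congr t (fun x _ => by
            by_cases h : pvMarker x <;> simp [h, marker_not_wire x])
        rw [ih]
        cases m <;> simp_all [pvScanA]
        cases r <;> cases w <;> simp_all
      · rw [if_neg hm]
        by_cases hw : w.isNone && pvWire c
        · rw [if_pos hw, ih]
          obtain ⟨hw1, hw2⟩ := Bool.and_eq_true_iff.mp hw
          cases w <;> simp_all
          cases r <;> cases m <;> simp_all [pvScanA]
        · rw [if_neg hw, ih]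
          cases r <;> cases m <;> cases w <;> simp_all [pvScanA]

-- a scan finds nothing iff the predicate is false on every element
theorem scanA_eq_none {g : Int → Bool} (cs : List Int) :
    pvScanA g cs = none ↔ ∀ c ∈ cs, g c = false := by
  induction cs with
  | nil => simp [pvScanA]
  | cons c t ih =>
    by_cases hg : g c <;> simp [pvScanA, hg, ih]

-- ===== VERDICT (by name: the statement is the Claim_ definition above) =====
theorem choose_primary_result_code_spec : Claim_equal_choose_primary_result_code := by
  intro codes _
  unfold Spec_choose_primary_result_code choose_primary_result_code choose_primary_result_code_alt
  set cs := codes.filter (fun c => decide (c ≠ 0)) with hcs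
  by_cases he : cs.isEmpty
  · simp [he]
  · simp only [he, Bool.false_eq_true, if_false]
    rw [foldB_eq_scans]
    simp only [Option.isNone_none, Option.or_none, Bool.true_and, if_true]
    cases h1 : pvScanA pvRoi cs with
    | some c => simp
    | none =>
      have hR : ∀ c ∈ cs, pvRoi c = false := (scanA_eq_none cs).mp h1
      rw [scanA_congr cs (p := fun c => !pvRoi c && pvMarker c) (q := pvMarker)
        (fun c hc => by simp [hR c hc])]
      cases h2 : pvScanA pvMarker cs with
      | some c => simp
      | none =>
        have hM : ∀ c ∈ cs, pvMarker c = false := (scanA_eq_none cs).mp h2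
        rw [scanA_congr cs
          (p := fun c => !pvRoi c && (!pvMarker c && pvWire c)) (q := pvWire)
          (fun c hc => by simp [hR c hc, hM c hc])]
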